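-- pv_equiv track=rewrite | github.com/aabdelw1/InterviewPrep-Algos | Companies/Apple/frogs.py | solution
-- ===== SOURCE A (Python) =====
-- def solution(A):
--     n = len(A)
--     result = 0
--     for i in range(n):
--         j = i
--         # move left while A are less than or equal to current block
--         while j > 0 and A[j-1] >= A[j]:
--             j -= 1
--         low = j
--         j = i
--         # move right while A are less than or equal to current block
--         while j < n-1 and A[j+1] >= A[j]:
--             j += 1
--         high = j
--         result = max(result, high - low)
--     return result
-- ===== SOURCE B (Python) =====
-- def solution(A):
--     n = len(A)
--     # right[i] = farthest index reachable moving right while non-decreasing, O(n) backward pass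
--     right = [0] * n
--     for i in range(n - 1, -1, -1):
--         if i + 1 < n and A[i + 1] >= A[i]:
--             right[i] = right[i + 1]
--         else:
--             right[i] = i
--     best = 0
--     low = 0
--     for i in range(n):
--         if i > 0 and A[i - 1] < A[i]:
--             low = i
--         best = max(best, right[i] - low)
--     return best
-- ===== Notes on version B (the rewrite author's own statement) =====
-- stated objective: faster
-- what changed: Replaced the per-index left/right while-loop walks (quadratic) by one backward DP pass computing the right run-extent array and one forward pass tracking the current non-increasing run start while maximising the span.
import Mathlib
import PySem

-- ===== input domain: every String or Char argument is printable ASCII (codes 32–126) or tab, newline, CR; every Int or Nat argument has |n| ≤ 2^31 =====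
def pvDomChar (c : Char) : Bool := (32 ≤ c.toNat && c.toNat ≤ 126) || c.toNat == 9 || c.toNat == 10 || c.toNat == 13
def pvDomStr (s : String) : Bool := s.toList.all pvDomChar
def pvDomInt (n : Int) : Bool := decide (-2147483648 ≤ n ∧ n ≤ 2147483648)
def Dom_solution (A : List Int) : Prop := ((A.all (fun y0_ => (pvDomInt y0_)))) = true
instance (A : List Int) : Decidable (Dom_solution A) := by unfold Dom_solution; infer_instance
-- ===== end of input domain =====

-- B replaces A's per-index quadratic left/right while-loop walks by one backward DP pass
-- (right run-extent array) plus one forward pass tracking the current run start: O(n).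

-- ===== PORT A =====
-- A's inner left while-loop: 'while j > 0 and A[j-1] >= A[j]: j -= 1' (recursion on j).
def whileLeft (A : List Int) : Nat → Nat
  | 0 => 0
  | j + 1 => if A.getD j 0 ≥ A.getD (j + 1) 0 then whileLeft A j else j + 1

-- A's inner right while-loop: 'while j < n-1 and A[j+1] >= A[j]: j += 1'.
-- Fuel A.length bounds the ≤ n-1-j iterations; 'j < n-1' on Python ints is 'j+1 < n' here.
def whileRight (A : List Int) : Nat → Nat → Nat
  | 0, j => j
  | f + 1, j =>
    if j + 1 < A.length then
      (if A.getD (j + 1) 0 ≥ A.getD j 0 then whileRight A f (j + 1) else j)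
    else j

def solution (A : List Int) : Int :=
  (List.range A.length).foldl
    (fun result i =>
      max result ((whileRight A A.length i : Int) - (whileLeft A i : Int))) 0

-- ===== PORT B =====
-- Source B's backward loop 'for i in range(n-1,-1,-1): right[i] = ...' building the array
-- back-to-front: rightBuild A m is right[(n-m)..n-1]; right[i+1] is the head of the tail.
def rightBuild (A : List Int) : Nat → List Nat
  | 0 => []
  | m + 1 =>
    let rest := rightBuild A m
    let i := A.length - (m + 1)
    (if i + 1 < A.length ∧ A.getD (i + 1) 0 ≥ A.getD i 0 then rest.headD i else i) :: rest

-- Source B's forward pass: state (best, low); 'if i > 0 and A[i-1] < A[i]: low = i'.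
def solution_alt (A : List Int) : Int :=
  let right := rightBuild A A.length
  ((List.range A.length).foldl
    (fun (st : Int × Nat) i =>
      let low := if 0 < i ∧ A.getD (i - 1) 0 < A.getD i 0 then i else st.2
      (max st.1 ((right.getD i 0 : Int) - (low : Int)), low)) ((0 : Int), 0)).1

-- ===== PRECONDITION & SPEC =====
def Spec_solution (A : List Int) (out : Int) : Prop := out = solution_alt A
instance (A : List Int) (out : Int) : Decidable (Spec_solution A out) := by unfold Spec_solution; infer_instance

-- ===== CLAIM (what is proved, stated in full; the proofs are below) =====
def Claim_equal_solution : Prop := ∀ (A : List Int), Dom_solution A → Spec_solution A (solution A)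

-- ===== LEMMAS AND PROOFS =====

-- The right run-extent as a spec function (recursion on n - j).
def rF (A : List Int) (j : Nat) : Nat :=
  if h : j + 1 < A.length ∧ A.getD (j + 1) 0 ≥ A.getD j 0 then rF A (j + 1) else j
termination_by A.length - j
decreasing_by omega

lemma whileRight_eq_rF (A : List Int) (f j : Nat) (hf : A.length ≤ f + j + 1) :
    whileRight A f j = rF A j := by
  induction f generalizing j with
  | zero =>
    rw [whileRight, rF]
    rw [dif_neg]
    omega
  | succ f ih =>
    rw [whileRight, rF]
    by_cases h1 : j + 1 < A.length
    · by_cases h2 : A.getD (j + 1) 0 ≥ A.getD j 0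
      · rw [if_pos h1, if_pos h2, dif_pos ⟨h1, h2⟩]
        exact ih (j + 1) (by omega)
      · rw [if_pos h1, if_neg h2, dif_neg (by tauto)]
    · rw [if_neg h1, dif_neg (by tauto)]

lemma rightBuild_length (A : List Int) (m : Nat) : (rightBuild A m).length = m := by
  induction m with
  | zero => rfl
  | succ m ih => simp [rightBuild, ih]

lemma rightBuild_getD (A : List Int) (m : Nat) (hm : m ≤ A.length) :
    ∀ k < m, (rightBuild A m).getD k 0 = rF A (A.length - m + k) := by
  induction m with
  | zero => intro k hk; omega
  | succ m ih =>
    intro k hk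
    rw [rightBuild]
    cases k with
    | zero =>
      simp only [List.getD_cons_zero, Nat.add_zero]
      by_cases hc : A.length - (m + 1) + 1 < A.length ∧
          A.getD (A.length - (m + 1) + 1) 0 ≥ A.getD (A.length - (m + 1)) 0
      · rw [if_pos hc]
        have hm0 : 0 < m := by omega
        have hhead : (rightBuild A m).headD (A.length - (m + 1)) = (rightBuild A m).getD 0 0 := by
          have := rightBuild_length A m
          cases hrb : rightBuild A m with
          | nil => rw [hrb] at this; simp at this; omega
          | cons a l => simp
        rw [hhead, ih (by omega) 0 hm0]
        conv_rhs => rw [rF]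
        rw [dif_pos hc]
        congr 1
        omega
      · rw [if_neg hc]
        conv_rhs => rw [rF]
        rw [dif_neg hc]
    | succ k =>
      simp only [List.getD_cons_succ]
      rw [ih (by omega) k (by omega)]
      congr 1
      omega

lemma right_getD (A : List Int) (i : Nat) (hi : i < A.length) :
    (rightBuild A A.length).getD i 0 = rF A i := by
  have := rightBuild_getD A A.length le_rfl i hi
  simpa using this

lemma fold_inv (A : List Int) (k : Nat) (hk : k ≤ A.length) :
    (List.range k).foldl
      (fun (st : Int × Nat) i =>
        let low := if 0 < i ∧ A.getD (i - 1) 0 < A.getD i 0 then i else st.2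
        (max st.1 (((rightBuild A A.length).getD i 0 : Int) - (low : Int)), low)) ((0 : Int), 0)
    = ((List.range k).foldl
        (fun result i =>
          max result ((whileRight A A.length i : Int) - (whileLeft A i : Int))) 0,
       whileLeft A (k - 1)) := by
  induction k with
  | zero => simp [whileLeft]
  | succ k ih =>
    rw [List.range_succ, List.foldl_append, List.foldl_append,
        ih (by omega)]
    simp only [List.foldl_cons, List.foldl_nil]
    have hlow : (if 0 < k ∧ A.getD (k - 1) 0 < A.getD k 0 then k else whileLeft A (k - 1))
        = whileLeft A k := by
      cases k with
      | zero => simp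
      | succ j =>
        simp only [Nat.add_sub_cancel]
        rw [whileLeft]
        by_cases h : A.getD j 0 ≥ A.getD (j + 1) 0
        · rw [if_pos h, if_neg (fun hcon => absurd hcon.2 (not_lt.mpr h))]
        · rw [if_neg h, if_pos ⟨Nat.succ_pos j, lt_of_not_ge h⟩]
    have hr : (rightBuild A A.length).getD k 0 = whileRight A A.length k := by
      rw [right_getD A k (by omega), whileRight_eq_rF A A.length k (by omega)]
    simp only [hlow, hr, Nat.add_sub_cancel]

-- ===== VERDICT (by name: the statement is the Claim_ definition above) =====
theorem solution_spec : Claim_equal_solution := by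
  intro A _
  unfold Spec_solution solution solution_alt
  simp only [fold_inv A A.length le_rfl]
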